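-- pv_equiv track=rewrite | github.com/Afreen-Kazi-1/InvestmentPortfolioRebalancer | portfolio_balancer/src/api/services.py | get_asset_class_mapping
-- ===== SOURCE A (Python) =====
-- def get_asset_class_mapping(tickers: list) -> dict:
--     """
--     Provides a simplified mapping of tickers to asset classes.
--     In a real application, this would be fetched from a database or a more robust service.
--     """
--     mapping = {}
--     for ticker in tickers:
--         if ticker in ["AAPL", "GOOGL", "MSFT"]: # Example equities
--             mapping[ticker] = "equities"
--         elif ticker in ["BND", "AGG"]: # Example bonds
--             mapping[ticker] = "bonds"
--         elif ticker == "CASH":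
--             mapping[ticker] = "cash"
--         elif ticker in ["BTC-USD", "ETH-USD"]: # Example crypto
--             mapping[ticker] = "crypto" # Add crypto as a new asset class
--         else:
--             mapping[ticker] = "other" # Default or unknown
--     return mapping
-- ===== SOURCE B (Python) =====
-- _CLASSES = [
--     ("equities", ("AAPL", "GOOGL", "MSFT")),
--     ("bonds", ("BND", "AGG")),
--     ("cash", ("CASH",)),
--     ("crypto", ("BTC-USD", "ETH-USD")),
-- ]
--
-- def get_asset_class_mapping(tickers: list) -> dict:
--     # Stage 1: every ticker defaults to "other" (first-occurrence key order).
--     mapping = dict.fromkeys(tickers, "other")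
--     # Stage 2: sweep the class table once, overwriting the tickers we know.
--     for cls, members in _CLASSES:
--         for m in members:
--             if m in mapping:
--                 mapping[m] = cls
--     return mapping
-- ===== Notes on version B (the rewrite author's own statement) =====
-- stated objective: alternative
-- what changed: Instead of classifying each ticker through the if/elif ladder, B first builds the result with dict.fromkeys(tickers, 'other') and then makes one sweep over the fixed class table, overwriting the entries for known tickers; the per-ticker branch scan disappears and the second pass iterates over the table, not over the input.
import Mathlib
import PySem

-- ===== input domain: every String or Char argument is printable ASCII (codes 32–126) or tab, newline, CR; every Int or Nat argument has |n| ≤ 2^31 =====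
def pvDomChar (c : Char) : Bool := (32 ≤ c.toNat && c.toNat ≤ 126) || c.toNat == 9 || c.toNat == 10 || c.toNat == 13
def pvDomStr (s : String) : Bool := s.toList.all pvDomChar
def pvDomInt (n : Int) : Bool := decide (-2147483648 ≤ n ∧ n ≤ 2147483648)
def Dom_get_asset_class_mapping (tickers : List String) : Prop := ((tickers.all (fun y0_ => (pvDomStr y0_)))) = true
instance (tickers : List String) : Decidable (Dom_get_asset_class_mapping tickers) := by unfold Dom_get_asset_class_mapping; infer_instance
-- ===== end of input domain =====

-- B replaces A's per-ticker if/elif ladder by two stages: default every ticker to "other", then one sweep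
-- over the fixed class table overwriting the known tickers (alternative decomposition, same cost).

-- ===== PORT A =====
def get_asset_class_mapping (tickers : List String) : List (String × String) :=
  (tickers.foldl (fun mapping ticker =>
      if ["AAPL", "GOOGL", "MSFT"].contains ticker then mapping.insert ticker "equities"
      else if ["BND", "AGG"].contains ticker then mapping.insert ticker "bonds"
      else if ticker = "CASH" then mapping.insert ticker "cash"
      else if ["BTC-USD", "ETH-USD"].contains ticker then mapping.insert ticker "crypto"
      else mapping.insert ticker "other")
    (PySem.Dict.empty)).items

-- ===== PORT B =====
def classesB : List (String × List String) :=
  [("equities", ["AAPL", "GOOGL", "MSFT"]),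
   ("bonds", ["BND", "AGG"]),
   ("cash", ["CASH"]),
   ("crypto", ["BTC-USD", "ETH-USD"])]

def get_asset_class_mapping_alt (tickers : List String) : List (String × String) :=
  -- dict.fromkeys(tickers, "other") = first occurrences in order, all mapped to "other"
  (classesB.foldl (fun mapping p =>
      p.2.foldl (fun mapping m =>
        if mapping.contains m then mapping.insert m p.1 else mapping) mapping)
    (PySem.Dict.mk ((PySem.List.dedup tickers).map (fun t => (t, "other"))))).items

-- ===== PRECONDITION & SPEC =====
def Spec_get_asset_class_mapping (tickers : List String) (out : List (String × String)) : Prop := out = get_asset_class_mapping_alt tickers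
instance (tickers : List String) (out : List (String × String)) : Decidable (Spec_get_asset_class_mapping tickers out) := by unfold Spec_get_asset_class_mapping; infer_instance

-- ===== CLAIM (what is proved, stated in full; the proofs are below) =====
def Claim_equal_get_asset_class_mapping : Prop := ∀ (tickers : List String), Dom_get_asset_class_mapping tickers → Spec_get_asset_class_mapping tickers (get_asset_class_mapping tickers)

-- ===== LEMMAS AND PROOFS =====

-- The class A's branch ladder assigns to a ticker (proof-side characterisation).
def classOf (t : String) : String :=
  if ["AAPL", "GOOGL", "MSFT"].contains t then "equities"
  else if ["BND", "AGG"].contains t then "bonds"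
  else if t = "CASH" then "cash"
  else if ["BTC-USD", "ETH-USD"].contains t then "crypto"
  else "other"

def tick8 : List String := ["AAPL", "GOOGL", "MSFT", "BND", "AGG", "CASH", "BTC-USD", "ETH-USD"]

theorem stepA_eq (m : PySem.Dict String String) (t : String) :
    (if ["AAPL", "GOOGL", "MSFT"].contains t then m.insert t "equities"
     else if ["BND", "AGG"].contains t then m.insert t "bonds"
     else if t = "CASH" then m.insert t "cash"
     else if ["BTC-USD", "ETH-USD"].contains t then m.insert t "crypto"
     else m.insert t "other") = m.insert t (classOf t) := by
  unfold classOf; split_ifs <;> rfl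

theorem foldl_insert_getD (l : List String) (d : PySem.Dict String String)
    (f : String → String) (k dflt : String) :
    (l.foldl (fun d t => d.insert t (f t)) d).getD k dflt
      = if k ∈ l then f k else d.getD k dflt := by
  induction l generalizing d with
  | nil => simp
  | cons t rest ih =>
    simp only [List.foldl_cons, ih, List.mem_cons]
    by_cases hr : k ∈ rest
    · simp [hr]
    · by_cases ht : k = t
      · simp [ht, PySem.Dict.getD_insert_self]
      · simp [hr, ht, PySem.Dict.getD_insert]

theorem classOf_other (k : String) (h : k ∉ tick8) : classOf k = "other" := by
  simp only [tick8, List.mem_cons, not_or] at h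
  obtain ⟨h1, h2, h3, h4, h5, h6, h7, h8, -⟩ := h
  simp [classOf, h1, h2, h3, h4, h5, h6, h7, h8]

theorem stepB_contains (d : PySem.Dict String String) (m c k : String) :
    ((if d.contains m then d.insert m c else d).contains k) = d.contains k := by
  by_cases h : d.contains m = true
  · by_cases hk : k = m
    · subst hk; simp [h, PySem.Dict.contains_insert_self]
    · simp [h, PySem.Dict.contains_insert, hk]
  · simp [h]

theorem stepB_getD (d : PySem.Dict String String) (m c k v0 : String) :
    ((if d.contains m then d.insert m c else d).getD k v0)
      = if k = m ∧ d.contains k = true then c else d.getD k v0 := by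
  by_cases h : d.contains m = true
  · by_cases hk : k = m
    · subst hk; simp [h, PySem.Dict.getD_insert_self]
    · simp [h, hk, PySem.Dict.getD_insert]
  · by_cases hk : k = m
    · subst hk; simp [h]
    · simp [h, hk]



theorem stepB_keys (d : PySem.Dict String String) (m c : String) :
    ((if d.contains m then d.insert m c else d).keys) = d.keys := by
  by_cases h : d.contains m = true
  · simp [h, PySem.Dict.keys_insert_of_contains _ _ h]
  · simp [h]

def flat8 : List (String × String) :=
  [("AAPL","equities"),("GOOGL","equities"),("MSFT","equities"),
   ("BND","bonds"),("AGG","bonds"),("CASH","cash"),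
   ("BTC-USD","crypto"),("ETH-USD","crypto")]

theorem steps_getD (ps : List (String × String)) (hnd : (ps.map Prod.fst).Nodup)
    (d : PySem.Dict String String) (k v0 : String) :
    (ps.foldl (fun d p => if d.contains p.1 then d.insert p.1 p.2 else d) d).getD k v0
      = match ps.find? (fun p => p.1 == k) with
        | some q => if d.contains k = true then q.2 else d.getD k v0
        | none => d.getD k v0 := by
  induction ps generalizing d with
  | nil => simp
  | cons p ps ih =>
    simp only [List.map_cons, List.nodup_cons] at hnd
    rw [List.foldl_cons, ih hnd.2]
    by_cases hk : p.1 = k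
    · have hnone : ps.find? (fun q => q.1 == k) = none := by
        rw [List.find?_eq_none]
        intro q hq
        simp only [beq_iff_eq]
        intro hqk
        have hmem : q.1 ∈ ps.map Prod.fst := List.mem_map.mpr ⟨q, hq, rfl⟩
        rw [hqk, ← hk] at hmem
        exact hnd.1 hmem
      rw [hnone]
      simp only [List.find?_cons, show (p.1 == k) = true by simp [hk]]
      rw [stepB_getD]
      simp [hk]
    · have hb : (p.1 == k) = false := by simp [hk]
      simp only [List.find?_cons, hb]
      rcases hf : ps.find? (fun q => q.1 == k) with _ | q <;>
        simp only [hf, stepB_getD, stepB_contains, Ne.symm hk, false_and, if_false]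

theorem sweep_eq_flat (d : PySem.Dict String String) :
    (classesB.foldl (fun mapping p =>
        p.2.foldl (fun mapping m =>
          if mapping.contains m then mapping.insert m p.1 else mapping) mapping) d)
      = flat8.foldl (fun d p => if d.contains p.1 then d.insert p.1 p.2 else d) d := rfl

theorem sweep_getD (d : PySem.Dict String String) (k v0 : String) :
    ((classesB.foldl (fun mapping p =>
        p.2.foldl (fun mapping m =>
          if mapping.contains m then mapping.insert m p.1 else mapping) mapping) d).getD k v0)
      = if k ∈ tick8 ∧ d.contains k = true then classOf k else d.getD k v0 := by
  rw [sweep_eq_flat, steps_getD flat8 (by decide)]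
  rcases eq_or_ne k "AAPL" with h | h1
  · subst h; simp [tick8, classOf, flat8]
  rcases eq_or_ne k "GOOGL" with h | h2
  · subst h; simp [tick8, classOf, flat8]
  rcases eq_or_ne k "MSFT" with h | h3
  · subst h; simp [tick8, classOf, flat8]
  rcases eq_or_ne k "BND" with h | h4
  · subst h; simp [tick8, classOf, flat8]
  rcases eq_or_ne k "AGG" with h | h5
  · subst h; simp [tick8, classOf, flat8]
  rcases eq_or_ne k "CASH" with h | h6
  · subst h; simp [tick8, classOf, flat8]
  rcases eq_or_ne k "BTC-USD" with h | h7
  · subst h; simp [tick8, classOf, flat8]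
  rcases eq_or_ne k "ETH-USD" with h | h8
  · subst h; simp [tick8, classOf, flat8]
  simp [tick8, flat8, beq_iff_eq,
    Ne.symm h1, Ne.symm h2, Ne.symm h3, Ne.symm h4, Ne.symm h5, Ne.symm h6, Ne.symm h7, Ne.symm h8,
    h1, h2, h3, h4, h5, h6, h7, h8]

theorem sweep_keys (d : PySem.Dict String String) :
    ((classesB.foldl (fun mapping p =>
        p.2.foldl (fun mapping m =>
          if mapping.contains m then mapping.insert m p.1 else mapping) mapping) d).keys)
      = d.keys := by
  rw [sweep_eq_flat]
  simp only [flat8, List.foldl_cons, List.foldl_nil, stepB_keys]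
-- ===== VERDICT (by name: the statement is the Claim_ definition above) =====
theorem get_asset_class_mapping_spec : Claim_equal_get_asset_class_mapping := by
  intro tickers _
  unfold Spec_get_asset_class_mapping get_asset_class_mapping get_asset_class_mapping_alt
  have hA : (tickers.foldl (fun mapping ticker =>
      if ["AAPL", "GOOGL", "MSFT"].contains ticker then mapping.insert ticker "equities"
      else if ["BND", "AGG"].contains ticker then mapping.insert ticker "bonds"
      else if ticker = "CASH" then mapping.insert ticker "cash"
      else if ["BTC-USD", "ETH-USD"].contains ticker then mapping.insert ticker "crypto"
      else mapping.insert ticker "other") (PySem.Dict.empty))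
      = tickers.foldl (fun m t => m.insert t (classOf t)) PySem.Dict.empty :=
    PySem.List.foldl_congr_mem tickers _ _ _ (fun m t _ => stepA_eq m t)
  rw [hA]
  set dA := tickers.foldl (fun m t => m.insert t (classOf t)) PySem.Dict.empty with hdA
  set base : PySem.Dict String String :=
    PySem.Dict.mk ((PySem.List.dedup tickers).map (fun t => (t, "other"))) with hbase
  set dB := classesB.foldl (fun mapping p =>
      p.2.foldl (fun mapping m =>
        if mapping.contains m then mapping.insert m p.1 else mapping) mapping) base with hdB
  have hAkeys : dA.keys = PySem.List.dedup tickers := by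
    rw [hdA, PySem.Dict.keys_foldl_insert]
    simp [PySem.Set.update_nil_left, PySem.List.dedup_eq_ofList]
  have hAnodup : dA.keys.Nodup := by rw [hAkeys]; exact PySem.List.nodup_dedup _
  have hbkeys : base.keys = PySem.List.dedup tickers := by
    simp [hbase, PySem.Dict.keys, Function.comp_def]
  have hBkeys : dB.keys = PySem.List.dedup tickers := by rw [hdB, sweep_keys, hbkeys]
  have hBnodup : dB.keys.Nodup := by rw [hBkeys]; exact PySem.List.nodup_dedup _
  have hAget : ∀ k ∈ PySem.List.dedup tickers, dA.getD k "other" = classOf k := by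
    intro k hk
    have hk' : k ∈ tickers := (PySem.List.mem_dedup tickers k).mp hk
    rw [hdA, foldl_insert_getD]
    simp [hk']
  have hBget : ∀ k ∈ PySem.List.dedup tickers, dB.getD k "other" = classOf k := by
    intro k hk
    have hbc : base.contains k = true := by
      rw [PySem.Dict.contains_eq_decide_mem_keys, hbkeys]
      simpa using hk
    have hbn : base.keys.Nodup := by rw [hbkeys]; exact PySem.List.nodup_dedup _
    have hbg : base.getD k "other" = "other" := by
      have hmem : (k, "other") ∈ base.items := by
        simp only [hbase]
        exact List.mem_map.mpr ⟨k, hk, rfl⟩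
      exact PySem.Dict.getD_of_mem_items base hmem hbn "other"
    rw [hdB, sweep_getD]
    by_cases ht : k ∈ tick8
    · simp [ht, hbc]
    · simp [ht, hbg, classOf_other k ht]
  rw [PySem.Dict.items_eq_map_keys dA hAnodup "other",
      PySem.Dict.items_eq_map_keys dB hBnodup "other", hAkeys, hBkeys]
  exact List.map_congr_left (fun k hk => by rw [hAget k hk, hBget k hk])
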